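-- pv_equiv track=rewrite | github.com/nobe0716/problem_solving | codeforces/contests/1299/A. Anu Has a Function.py | solve
-- ===== SOURCE A (Python) =====
-- _BOUND = 32
--
-- def solve(n, a):
--     total_counter = [0] * _BOUND
--     counters = []
--     for e in a:
--         binary = bin(e)[1:]
--         lc = [0] * _BOUND
--         for i, v in enumerate(binary[::-1]):
--             if v == '1':
--                 lc[i] = 1
--                 total_counter[i] += 1
--         counters.append(lc)
--
--     max_v = 0
--     max_i = 0
--     for i in range(n):
--         lc = counters[i]
--         lv = 0
--         for j, v in enumerate(lc):
--             if total_counter[j] == 1 and lc[j] == 1: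
--                 lv += 2 ** j
--
--         if lv > max_v:
--             max_i = i
--             max_v = lv
--
--     r = [a[max_i]]
--     for i in range(n):
--         if i == max_i:
--             continue
--         r.append(a[i])
--     return ' '.join(map(str, r))
-- ===== SOURCE B (Python) =====
-- def _bit(e, j):
--     # bit j of the magnitude of e
--     return abs(e) >> j & 1
--
-- def solve(n, a):
--     count = [sum(_bit(e, j) for e in a) for j in range(32)]
--     leader = 0
--     for j in reversed(range(32)):
--         if count[j] == 1:
--             i = next((i for i in range(n) if _bit(a[i], j)), None)
--             if i is not None:
--                 leader = i
--                 break
--     rest = (a[i] for i in range(n) if i != leader)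
--     return ' '.join(map(str, [a[leader], *rest]))
-- ===== Notes on version B (the rewrite author's own statement) =====
-- stated objective: alternative
-- what changed: Replaces A's per-element scoring (a 32-entry 0/1 list per element, a total-counter table, and an argmax of score sums over all candidates) by a top-down search: build the per-bit count table once, then scan bit positions from 31 down and pick the first bit held by exactly one element that has a holder among the first n, whose holder is moved to the front; Pre_ excludes exactly the inputs where A raises IndexError (empty a, or n > len(a)).
import Mathlib
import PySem

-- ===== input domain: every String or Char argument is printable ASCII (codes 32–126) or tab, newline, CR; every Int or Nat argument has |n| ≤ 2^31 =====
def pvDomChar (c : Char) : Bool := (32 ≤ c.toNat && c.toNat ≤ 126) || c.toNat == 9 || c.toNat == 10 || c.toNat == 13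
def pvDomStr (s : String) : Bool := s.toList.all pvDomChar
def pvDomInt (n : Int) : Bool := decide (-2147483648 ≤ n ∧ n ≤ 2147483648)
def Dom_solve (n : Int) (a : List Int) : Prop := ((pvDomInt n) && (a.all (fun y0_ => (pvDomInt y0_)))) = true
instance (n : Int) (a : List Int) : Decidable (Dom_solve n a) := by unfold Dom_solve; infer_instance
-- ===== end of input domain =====

-- B replaces A's per-element 32-entry scoring lists and the argmax over score sums by a
-- single per-bit count table plus a top-down scan for the highest bit held by exactly one
-- element; the holder of that bit is moved to the front.

-- ===== PORT A =====
-- literal transliteration of A; bin(e)[1:] is ported as dropping the first char of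
-- PySem.Int.pyBin e (exact: s[1:] on a string = List.drop 1 on its chars), and the
-- [::-1] as List.reverse; list[i] = v assignments become List.set (i < 32 on Dom).
def solve (n : Int) (a : List Int) : String :=
  let p := a.foldl (fun (st : List Int × List (List Int)) e =>
      let binary := ((PySem.Int.pyBin e).toList.drop 1).reverse
      let q := (PySem.List.enumerate binary 0).foldl
        (fun (st2 : List Int × List Int) iv =>
          if iv.2 = '1' then
            (st2.1.set iv.1.toNat 1, st2.2.set iv.1.toNat (st2.2.getD iv.1.toNat 0 + 1))
          else st2)
        (List.replicate 32 0, st.1)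
      (q.2, st.2 ++ [q.1]))
    (List.replicate 32 0, ([] : List (List Int)))
  let total := p.1
  let counters := p.2
  let mm := (PySem.List.pyRange 0 n 1).foldl
    (fun (st : Int × Int) i =>
      let lc := PySem.List.pyGetD counters i []
      let lv := (PySem.List.enumerate lc 0).foldl
        (fun lv jv =>
          if total.getD jv.1.toNat 0 = 1 ∧ lc.getD jv.1.toNat 0 = 1 then
            lv + 2 ^ jv.1.toNat
          else lv)
        (0 : Int)
      if lv > st.1 then (lv, i) else st)
    ((0 : Int), (0 : Int))
  let maxI := mm.2
  let r := (PySem.List.pyRange 0 n 1).foldl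
    (fun r i => if i = maxI then r else r ++ [PySem.List.pyGetD a i 0])
    [PySem.List.pyGetD a maxI 0]
  PySem.Str.join " " (r.map PySem.Int.toStr)

-- ===== PORT B =====
-- _bit(e, j) = abs(e) >> j & 1; the shift count j is a range(32) index, so j.toNat is exact
def bitB (e : Int) (j : Int) : Int := PySem.Int.band (|e| >>> j.toNat) 1

-- the for-j loop with break: first j (scanning 31..0) with count[j] == 1 and a holder
-- among the first n indices wins; count[j] is always in range (j from reversed(range(32)))
def scanB (n : Int) (a : List Int) (count : List Int) : List Int → Int
  | [] => 0
  | j :: js =>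
    if PySem.List.pyGetD count j 0 = 1 then
      match (PySem.List.pyRange 0 n 1).find?
          (fun i => bitB (PySem.List.pyGetD a i 0) j != 0) with
      | some i => i
      | none => scanB n a count js
    else scanB n a count js

-- literal transliteration of Source B: per-bit count table (comprehension over range(32)),
-- top-down unique-bit scan (reversed(range(32))), output the leader then the rest
def solve_alt (n : Int) (a : List Int) : String :=
  let count := (PySem.List.pyRange 0 32 1).map (fun j => (a.map (fun e => bitB e j)).sum)
  let leader := scanB n a count ((PySem.List.pyRange 0 32 1).reverse)
  let rest := ((PySem.List.pyRange 0 n 1).filter (fun i => i != leader)).map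
    (fun i => PySem.List.pyGetD a i 0)
  PySem.Str.join " " ((PySem.List.pyGetD a leader 0 :: rest).map PySem.Int.toStr)

-- ===== PRECONDITION & SPEC =====
-- Pre_ excludes exactly the inputs where A raises IndexError: empty a (a[max_i]) and
-- n > len(a) (counters[i]); A returns on everything else.
def Pre_solve (n : Int) (a : List Int) : Prop := a ≠ [] ∧ n ≤ (a.length : Int)
instance (n : Int) (a : List Int) : Decidable (Pre_solve n a) := by unfold Pre_solve; infer_instance
def pvWitness_solve : Int × List Int := (3, [1, 2, 3])
def Spec_solve (n : Int) (a : List Int) (out : String) : Prop := out = solve_alt n a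
instance (n : Int) (a : List Int) (out : String) : Decidable (Spec_solve n a out) := by unfold Spec_solve; infer_instance

-- ===== CLAIM (what is proved, stated in full; the proofs are below) =====
def Claim_equal_solve : Prop := ∀ (n : Int) (a : List Int), Dom_solve n a → Pre_solve n a → Spec_solve n a (solve n a)

-- ===== LEMMAS AND PROOFS =====

/-- Bit `j` of `|e|` (Python's `bin` shows magnitude bits for negatives). -/
def bitv (e : Int) (j : Nat) : Bool := e.natAbs.testBit j

/-- Number of elements of `a` having bit `j` set. -/
def cnt (a : List Int) (j : Nat) : Nat := List.countP (fun e => bitv e j) a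

/-- The 32-entry 0/1 list A builds for one element. -/
def lcOf (e : Int) : List Int := (List.range 32).map (fun j => if bitv e j then (1 : Int) else 0)

/-- One term of A's score sum for element `e`. -/
def term (a : List Int) (e : Int) (j : Nat) : Int :=
  if cnt a j = 1 ∧ bitv e j = true then 2 ^ j else 0

/-- A's score of element `e`: sum of `2^j` over bits `j < 32` that are set in `e` and
in exactly one element of `a`. -/
def score (a : List Int) (e : Int) : Int := ((List.range 32).map (term a e)).sum

/-- Little-endian binary digit characters of `m` (empty for 0). -/
def bitsLE (m : Nat) : List Char :=
  if h : m = 0 then [] else (if m % 2 = 1 then '1' else '0') :: bitsLE (m / 2)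
decreasing_by exact Nat.div_lt_self (Nat.pos_of_ne_zero h) (by norm_num)

theorem bitsLE_lt (m : Nat) : m < 2 ^ (bitsLE m).length := by
  induction m using Nat.strong_induction_on with
  | _ m ih =>
    rw [bitsLE]
    by_cases h : m = 0
    · simp [h]
    · have := ih (m / 2) (Nat.div_lt_self (Nat.pos_of_ne_zero h) (by norm_num))
      simp only [h, dite_false, List.length_cons, pow_succ]
      omega

theorem bitsLE_getElem? (m j : Nat) : ((bitsLE m)[j]? = some '1') = (m.testBit j = true) := by
  induction m using Nat.strong_induction_on generalizing j with
  | _ m ih =>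
    rw [bitsLE]
    by_cases h : m = 0
    · simp [h]
    · simp only [h, dite_false]
      cases j with
      | zero =>
        by_cases h2 : m % 2 = 1 <;> simp [h2, Nat.testBit_zero]
      | succ j =>
        rw [List.getElem?_cons_succ, ih (m / 2) (Nat.div_lt_self (Nat.pos_of_ne_zero h) (by norm_num)),
          Nat.testBit_succ]

theorem toDigitsCore_eq (m : Nat) : ∀ (f : Nat) (acc : List Char), m < f → m ≠ 0 →
    Nat.toDigitsCore 2 f m acc = (bitsLE m).reverse ++ acc := by
  induction m using Nat.strong_induction_on with
  | _ m ih =>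
    intro f acc hf hm
    obtain ⟨f, rfl⟩ : ∃ g, f = g + 1 := ⟨f - 1, by omega⟩
    have hd : Nat.digitChar (m % 2) = if m % 2 = 1 then '1' else '0' := by
      have : m % 2 = 0 ∨ m % 2 = 1 := by omega
      rcases this with h | h <;> simp [h, Nat.digitChar]
    rw [Nat.toDigitsCore]
    by_cases h2 : m / 2 = 0
    · rw [if_pos h2, bitsLE]
      simp only [hm, dite_false]
      rw [bitsLE, dif_pos h2]
      simp [hd]
    · rw [if_neg h2, ih (m / 2) (Nat.div_lt_self (Nat.pos_of_ne_zero hm) (by norm_num)) f _ (by omega) h2]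
      conv_rhs => rw [bitsLE]
      simp [hm, hd]

theorem toDigits_two (m : Nat) : Nat.toDigits 2 m = if m = 0 then ['0'] else (bitsLE m).reverse := by
  by_cases h : m = 0
  · subst h; rfl
  · rw [Nat.toDigits, toDigitsCore_eq m (m + 1) [] (by omega) h, if_neg h, List.append_nil]

/-- The reversed char list A iterates over (`bin(e)[1:][::-1]`). -/
def dl (e : Int) : List Char := ((PySem.Int.pyBin e).toList.drop 1).reverse

theorem dl_eq (e : Int) :
    dl e = bitsLE e.natAbs ++ (if e < 0 then ['b', '0'] else if e = 0 then ['0', 'b'] else ['b']) := by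
  unfold dl
  rw [PySem.Int.toList_pyBin, PySem.Int.toBinChars0b]
  by_cases h : e < 0
  · have hm : e.natAbs ≠ 0 := by omega
    rw [if_pos h, toDigits_two, if_neg hm]
    simp [h]
  · by_cases h0 : e = 0
    · subst h0; rw [if_neg h]; simp [Nat.toDigits, Nat.toDigitsCore, bitsLE, Nat.digitChar]
    · have hm : e.natAbs ≠ 0 := by omega
      rw [if_neg h, toDigits_two]
      have : e.toNat = e.natAbs := by omega
      rw [this, if_neg hm]
      simp [h, h0]

theorem oneAt_dl (e : Int) (j : Nat) : ((dl e)[j]? = some '1') = (bitv e j = true) := by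
  rw [dl_eq, bitv]
  rcases Nat.lt_or_ge j (bitsLE e.natAbs).length with hj | hj
  · rw [List.getElem?_append_left hj, bitsLE_getElem?]
  · rw [List.getElem?_append_right hj]
    have hbit : e.natAbs.testBit j = false :=
      Nat.testBit_lt_two_pow (lt_of_lt_of_le (bitsLE_lt e.natAbs)
        (Nat.pow_le_pow_right (by norm_num) hj))
    rw [hbit]
    simp only [eq_iff_iff, Bool.false_eq_true, iff_false]
    intro hcon
    have := List.mem_of_getElem? hcon
    split_ifs at this <;> simp_all

theorem bitv_lt (e : Int) (j : Nat) (he : e.natAbs ≤ 2 ^ 31) (hb : bitv e j = true) : j < 32 := by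
  rw [bitv] at hb
  by_contra hj
  have : e.natAbs < 2 ^ j := by
    calc e.natAbs ≤ 2 ^ 31 := he
    _ < 2 ^ j := by exact Nat.pow_lt_pow_right (by norm_num) (by omega)
  rw [Nat.testBit_lt_two_pow this] at hb
  exact Bool.false_ne_true hb

/-- Elementwise description of A's inner (lc, total_counter) fold. -/
theorem inner_fold (s : List Char) : ∀ (k : Nat) (lc tc : List Int),
    (∀ i, (hi : i < s.length) → s[i] = '1' → k + i < lc.length ∧ k + i < tc.length) →
    (((PySem.List.enumerate s (k : Int)).foldl
        (fun (st2 : List Int × List Int) iv =>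
          if iv.2 = '1' then
            (st2.1.set iv.1.toNat 1, st2.2.set iv.1.toNat (st2.2.getD iv.1.toNat 0 + 1))
          else st2)
        (lc, tc)).1.length = lc.length) ∧
    (((PySem.List.enumerate s (k : Int)).foldl
        (fun (st2 : List Int × List Int) iv =>
          if iv.2 = '1' then
            (st2.1.set iv.1.toNat 1, st2.2.set iv.1.toNat (st2.2.getD iv.1.toNat 0 + 1))
          else st2)
        (lc, tc)).2.length = tc.length) ∧
    ∀ j : Nat,
      (((PySem.List.enumerate s (k : Int)).foldl
        (fun (st2 : List Int × List Int) iv =>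
          if iv.2 = '1' then
            (st2.1.set iv.1.toNat 1, st2.2.set iv.1.toNat (st2.2.getD iv.1.toNat 0 + 1))
          else st2)
        (lc, tc)).1.getD j 0 = if k ≤ j ∧ s[j - k]? = some '1' then 1 else lc.getD j 0) ∧
      (((PySem.List.enumerate s (k : Int)).foldl
        (fun (st2 : List Int × List Int) iv =>
          if iv.2 = '1' then
            (st2.1.set iv.1.toNat 1, st2.2.set iv.1.toNat (st2.2.getD iv.1.toNat 0 + 1))
          else st2)
        (lc, tc)).2.getD j 0 = tc.getD j 0 + if k ≤ j ∧ s[j - k]? = some '1' then 1 else 0) := by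
  induction s with
  | nil =>
    intro k lc tc _
    simp [PySem.List.enumerate]
  | cons c s' ih =>
    intro k lc tc h
    rw [PySem.List.enumerate_cons, List.foldl_cons]
    have hk1 : (k : Int) + 1 = ((k + 1 : Nat) : Int) := by push_cast; ring
    by_cases hc : c = '1'
    · subst hc
      have hklen : k + 0 < lc.length ∧ k + 0 < tc.length := h 0 (by simp) (by simp)
      simp only [reduceIte, Int.toNat_natCast, hk1]
      have h' : ∀ i, (hi : i < s'.length) → s'[i] = '1' →
          k + 1 + i < (lc.set k 1).length ∧ k + 1 + i < (tc.set k (tc.getD k 0 + 1)).length := by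
        intro i hi hone
        have := h (i + 1) (by simpa using Nat.succ_lt_succ hi) (by simpa using hone)
        simp only [List.length_set]
        omega
      obtain ⟨L1, L2, HJ⟩ := ih (k + 1) (lc.set k 1) (tc.set k (tc.getD k 0 + 1)) h'
      refine ⟨by rw [L1]; simp, by rw [L2]; simp, fun j => ?_⟩
      obtain ⟨E1, E2⟩ := HJ j
      rw [E1, E2]
      rcases Nat.lt_trichotomy j k with hj | hj | hj
      · have h1 : ¬ (k + 1 ≤ j) := by omega
        have h2 : ¬ (k ≤ j) := by omega
        have hne : k ≠ j := by omega
        simp [h1, h2, List.getD_eq_getElem?_getD, List.getElem?_set, hne]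
      · subst hj
        have hlc : j < lc.length := by omega
        have htc : j < tc.length := by omega
        have h1 : ¬ (j + 1 ≤ j) := by omega
        have c2 : ('1' :: s')[j - j]? = some '1' := by simp
        simp [h1, hlc, htc, List.getD_eq_getElem?_getD, List.getElem?_set]
      · have hne : k ≠ j := by omega
        have h1 : (k + 1 ≤ j) := by omega
        have h2 : (k ≤ j) := by omega
        have c2 : ('1' :: s')[j - k]? = s'[j - (k + 1)]? := by
          have hh : j - k = (j - (k + 1)) + 1 := by omega
          rw [hh, List.getElem?_cons_succ]
        rw [c2]
        constructor <;> simp [h1, h2, List.getD_eq_getElem?_getD, List.getElem?_set, hne]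
    · simp only [hc, if_false]
      obtain ⟨L1, L2, HJ⟩ := ih (k + 1) lc tc (by
        intro i hi hone
        have := h (i + 1) (by simpa using Nat.succ_lt_succ hi) (by simpa using hone)
        omega)
      rw [hk1]
      refine ⟨L1, L2, fun j => ?_⟩
      obtain ⟨E1, E2⟩ := HJ j
      rw [E1, E2]
      rcases Nat.lt_trichotomy j k with hj | hj | hj
      · have h1 : ¬ (k + 1 ≤ j) := by omega
        have h2 : ¬ (k ≤ j) := by omega
        simp [h1, h2]
      · subst hj
        have h1 : ¬ (j + 1 ≤ j) := by omega
        have c2 : (c :: s')[j - j]? = some c := by simp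
        rw [c2]
        simp [h1, hc]
      · have h1 : (k + 1 ≤ j) := by omega
        have h2 : (k ≤ j) := by omega
        have c2 : (c :: s')[j - k]? = s'[j - (k + 1)]? := by
          have hh : j - k = (j - (k + 1)) + 1 := by omega
          rw [hh, List.getElem?_cons_succ]
        rw [c2]
        simp [h1, h2]

/-- A's inner loop on one element: the per-element list is `lcOf e`, the running
total counter is bumped at exactly the set bits of `|e|`. -/
theorem inner_spec (e : Int) (tc : List Int) (he : e.natAbs ≤ 2 ^ 31) (htc : tc.length = 32) :
    (((PySem.List.enumerate (((PySem.Int.pyBin e).toList.drop 1).reverse) 0).foldl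
        (fun (st2 : List Int × List Int) iv =>
          if iv.2 = '1' then
            (st2.1.set iv.1.toNat 1, st2.2.set iv.1.toNat (st2.2.getD iv.1.toNat 0 + 1))
          else st2)
        (List.replicate 32 0, tc)).1 = lcOf e) ∧
    (((PySem.List.enumerate (((PySem.Int.pyBin e).toList.drop 1).reverse) 0).foldl
        (fun (st2 : List Int × List Int) iv =>
          if iv.2 = '1' then
            (st2.1.set iv.1.toNat 1, st2.2.set iv.1.toNat (st2.2.getD iv.1.toNat 0 + 1))
          else st2)
        (List.replicate 32 0, tc)).2.length = 32) ∧
    (∀ j : Nat, ((PySem.List.enumerate (((PySem.Int.pyBin e).toList.drop 1).reverse) 0).foldl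
        (fun (st2 : List Int × List Int) iv =>
          if iv.2 = '1' then
            (st2.1.set iv.1.toNat 1, st2.2.set iv.1.toNat (st2.2.getD iv.1.toNat 0 + 1))
          else st2)
        (List.replicate 32 0, tc)).2.getD j 0
        = tc.getD j 0 + (if bitv e j then 1 else 0)) := by
  have hdl : ((PySem.Int.pyBin e).toList.drop 1).reverse = dl e := rfl
  have h : ∀ i, (hi : i < (dl e).length) → (dl e)[i] = '1' →
      0 + i < (List.replicate 32 (0 : Int)).length ∧ 0 + i < tc.length := by
    intro i hi hone
    have hsome : (dl e)[i]? = some '1' := by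
      rw [List.getElem?_eq_getElem hi, hone]
    have hb : bitv e i = true := by rw [← oneAt_dl e i]; exact hsome
    have := bitv_lt e i he hb
    simp [htc]
    omega
  obtain ⟨L1, L2, HJ⟩ := inner_fold (dl e) 0 (List.replicate 32 0) tc h
  rw [hdl]
  have hcast : ((0 : Nat) : Int) = (0 : Int) := rfl
  rw [hcast] at L1 L2 HJ
  refine ⟨?_, by rw [L2, htc], ?_⟩
  · apply List.ext_getElem
    · rw [L1]; simp [lcOf]
    · intro j h1 h2
      have hj32 : j < 32 := by rw [L1] at h1; simpa using h1
      have hgd := (HJ j).1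
      simp only [Nat.zero_le, true_and, Nat.sub_zero, oneAt_dl] at hgd
      rw [List.getD_eq_getElem?_getD, List.getElem?_eq_getElem h1] at hgd
      simp only [Option.getD_some] at hgd
      rw [hgd]
      have hrep : (List.replicate 32 (0 : Int)).getD j 0 = 0 := by
        rw [List.getD_eq_getElem?_getD, List.getElem?_replicate]
        split_ifs <;> simp
      rw [hrep]
      simp [lcOf, hj32]
  · intro j
    have hgd := (HJ j).2
    simp only [Nat.zero_le, true_and, Nat.sub_zero, oneAt_dl] at hgd
    rw [hgd]

/-- A's outer loop: `counters` is `a.map lcOf` and `total_counter` holds the bit counts. -/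
theorem outer_fold (a : List Int) : ∀ (t : List Int) (cs : List (List Int)),
    t.length = 32 → (∀ e ∈ a, e.natAbs ≤ 2 ^ 31) →
    ((a.foldl (fun (st : List Int × List (List Int)) e =>
        (((PySem.List.enumerate (((PySem.Int.pyBin e).toList.drop 1).reverse) 0).foldl
            (fun (st2 : List Int × List Int) iv =>
              if iv.2 = '1' then
                (st2.1.set iv.1.toNat 1, st2.2.set iv.1.toNat (st2.2.getD iv.1.toNat 0 + 1))
              else st2)
            (List.replicate 32 0, st.1)).2,
         st.2 ++ [((PySem.List.enumerate (((PySem.Int.pyBin e).toList.drop 1).reverse) 0).foldl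
            (fun (st2 : List Int × List Int) iv =>
              if iv.2 = '1' then
                (st2.1.set iv.1.toNat 1, st2.2.set iv.1.toNat (st2.2.getD iv.1.toNat 0 + 1))
              else st2)
            (List.replicate 32 0, st.1)).1])) (t, cs)).1.length = 32) ∧
    ((a.foldl (fun (st : List Int × List (List Int)) e =>
        (((PySem.List.enumerate (((PySem.Int.pyBin e).toList.drop 1).reverse) 0).foldl
            (fun (st2 : List Int × List Int) iv =>
              if iv.2 = '1' then
                (st2.1.set iv.1.toNat 1, st2.2.set iv.1.toNat (st2.2.getD iv.1.toNat 0 + 1))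
              else st2)
            (List.replicate 32 0, st.1)).2,
         st.2 ++ [((PySem.List.enumerate (((PySem.Int.pyBin e).toList.drop 1).reverse) 0).foldl
            (fun (st2 : List Int × List Int) iv =>
              if iv.2 = '1' then
                (st2.1.set iv.1.toNat 1, st2.2.set iv.1.toNat (st2.2.getD iv.1.toNat 0 + 1))
              else st2)
            (List.replicate 32 0, st.1)).1])) (t, cs)).2 = cs ++ a.map lcOf) ∧
    (∀ j : Nat, (a.foldl (fun (st : List Int × List (List Int)) e =>
        (((PySem.List.enumerate (((PySem.Int.pyBin e).toList.drop 1).reverse) 0).foldl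
            (fun (st2 : List Int × List Int) iv =>
              if iv.2 = '1' then
                (st2.1.set iv.1.toNat 1, st2.2.set iv.1.toNat (st2.2.getD iv.1.toNat 0 + 1))
              else st2)
            (List.replicate 32 0, st.1)).2,
         st.2 ++ [((PySem.List.enumerate (((PySem.Int.pyBin e).toList.drop 1).reverse) 0).foldl
            (fun (st2 : List Int × List Int) iv =>
              if iv.2 = '1' then
                (st2.1.set iv.1.toNat 1, st2.2.set iv.1.toNat (st2.2.getD iv.1.toNat 0 + 1))
              else st2)
            (List.replicate 32 0, st.1)).1])) (t, cs)).1.getD j 0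
        = t.getD j 0 + (cnt a j : Int)) := by
  induction a with
  | nil => intro t cs ht _; exact ⟨ht, by simp, by simp [cnt]⟩
  | cons e a' ih =>
    intro t cs ht hdom
    rw [List.foldl_cons]
    dsimp only
    obtain ⟨S1, S2, S3⟩ := inner_spec e t (hdom e (List.mem_cons_self)) ht
    rw [S1]
    obtain ⟨I1, I2, I3⟩ := ih _ (cs ++ [lcOf e]) S2 (fun x hx => hdom x (List.mem_cons_of_mem e hx))
    refine ⟨I1, by rw [I2, List.append_assoc, List.singleton_append, List.map_cons], fun j => ?_⟩
    rw [I3 j, S3 j]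
    have : cnt (e :: a') j = cnt a' j + (if bitv e j then 1 else 0) := by
      rw [cnt, cnt, List.countP_cons]
    rw [this]
    by_cases hb : bitv e j = true <;> simp [hb] <;> push_cast <;> ring

theorem foldl_ite_add {α : Type} (p : α → Prop) [DecidablePred p] (g : α → Int) :
    ∀ (l : List α) (init : Int),
    l.foldl (fun acc x => if p x then acc + g x else acc) init
      = init + (l.map (fun x => if p x then g x else 0)).sum := by
  intro l
  induction l with
  | nil => simp
  | cons x l ih =>
    intro init
    rw [List.foldl_cons, ih, List.map_cons, List.sum_cons]
    by_cases h : p x <;> simp [h] <;> ring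

theorem enumerate_range_map (k : Nat) (f : Nat → Int) :
    PySem.List.enumerate ((List.range k).map f) 0
      = (List.range k).map (fun (j : Nat) => ((j : Int), f j)) := by
  apply List.ext_getElem?
  intro i
  rw [PySem.List.getElem?_enumerate, List.getElem?_map, List.getElem?_map]
  by_cases h : i < k <;> simp [List.getElem?_range, h]

theorem lcOf_getD (e : Int) (j : Nat) (hj : j < 32) :
    (lcOf e).getD j 0 = if bitv e j then (1 : Int) else 0 := by
  rw [lcOf, List.getD_eq_getElem?_getD, List.getElem?_map, List.getElem?_range hj]
  simp

/-- A's per-candidate scoring fold is the score sum. -/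
theorem lv_eq_sum (a : List Int) (total : List Int) (e : Int)
    (htot : ∀ j : Nat, j < 32 → total.getD j 0 = (cnt a j : Int)) :
    (PySem.List.enumerate (lcOf e) 0).foldl
      (fun lv jv => if total.getD jv.1.toNat 0 = 1 ∧ (lcOf e).getD jv.1.toNat 0 = 1
        then lv + 2 ^ jv.1.toNat else lv) (0 : Int)
    = score a e := by
  have hrw : PySem.List.enumerate (lcOf e) 0
      = (List.range 32).map (fun (j : Nat) => ((j : Int), if bitv e j then (1 : Int) else 0)) := by
    rw [lcOf, enumerate_range_map]
  rw [hrw, List.foldl_map,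
    foldl_ite_add (fun (j : Nat) => total.getD ((j : Int), if bitv e j then (1 : Int) else 0).1.toNat 0 = 1
        ∧ (lcOf e).getD ((j : Int), if bitv e j then (1 : Int) else 0).1.toNat 0 = 1)
      (fun (j : Nat) => 2 ^ ((j : Int), if bitv e j then (1 : Int) else 0).1.toNat), zero_add]
  refine congrArg List.sum (List.map_congr_left ?_)
  intro j hj
  have hj32 : j < 32 := List.mem_range.mp hj
  dsimp only
  simp only [Int.toNat_natCast]
  rw [htot j hj32, lcOf_getD e j hj32, term]
  by_cases hcnt : cnt a j = 1 <;> by_cases hb : bitv e j = true <;> simp [hcnt, hb]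

theorem geom_sum_int (m : Nat) : ((List.range m).map (fun j => (2:Int)^j)).sum = 2 ^ m - 1 := by
  induction m with
  | zero => simp
  | succ m ih => rw [List.range_succ, List.map_append, List.sum_append]; simp [ih]; ring

theorem score_ge (a : List Int) (e : Int) (j : Nat) (hj : j < 32)
    (h1 : cnt a j = 1) (h2 : bitv e j = true) : (2:Int) ^ j ≤ score a e := by
  rw [score, show (32:Nat) = (j+1) + (31 - j) by omega, List.range_add, List.map_append,
    List.sum_append, List.range_succ, List.map_append, List.sum_append]
  have hterm : term a e j = 2 ^ j := by rw [term, if_pos ⟨h1, h2⟩]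
  have s1 : 0 ≤ ((List.range j).map (term a e)).sum := by
    apply List.sum_nonneg; intro x hx
    obtain ⟨k, _, rfl⟩ := List.mem_map.mp hx
    rw [term]; split_ifs <;> positivity
  have s2 : 0 ≤ ((List.map (fun x => j + 1 + x) (List.range (31 - j))).map (term a e)).sum := by
    apply List.sum_nonneg; intro x hx
    obtain ⟨k, _, rfl⟩ := List.mem_map.mp hx
    rw [term]; split_ifs <;> positivity
  simp only [List.map_cons, List.map_nil, List.sum_cons, List.sum_nil, hterm]
  linarith

theorem score_lt (a : List Int) (e : Int) (j : Nat) (hj : j ≤ 32)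
    (h : ∀ k : Nat, j ≤ k → k < 32 → term a e k = 0) : score a e < 2 ^ j := by
  rw [score, show (32:Nat) = j + (32 - j) by omega, List.range_add, List.map_append,
    List.sum_append]
  have s2 : ((List.map (fun x => j + x) (List.range (32 - j))).map (term a e)).sum = 0 := by
    apply List.sum_eq_zero; intro x hx
    obtain ⟨y, hy, rfl⟩ := List.mem_map.mp hx
    obtain ⟨k, hk, rfl⟩ := List.mem_map.mp hy
    exact h (j + k) (by omega) (by have := List.mem_range.mp hk; omega)
  have s1 : ((List.range j).map (term a e)).sum ≤ ((List.range j).map (fun k => (2:Int)^k)).sum := by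
    apply List.sum_le_sum
    intro k _
    rw [term]; split_ifs
    · exact le_rfl
    · positivity
  rw [s2, geom_sum_int] at *
  have : (0:Int) < 2 ^ j := by positivity
  linarith

theorem score_zero (a : List Int) (e : Int) (h : ∀ k : Nat, k < 32 → term a e k = 0) :
    score a e = 0 := by
  apply List.sum_eq_zero
  intro x hx
  obtain ⟨k, hk, rfl⟩ := List.mem_map.mp hx
  exact h k (List.mem_range.mp hk)

/-- Two distinct positions holding bit `j` force a bit count of at least 2. -/
theorem cnt_ge_two (a : List Int) (j i k : Nat) (hik : i < k) (hk : k < a.length)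
    (hbi : bitv (a[i]'(by omega)) j = true) (hbk : bitv (a[k]'hk) j = true) :
    2 ≤ cnt a j := by
  have hsplit : a = a.take k ++ a.drop k := (List.take_append_drop k a).symm
  rw [cnt, hsplit, List.countP_append] at *
  have h1 : 0 < List.countP (fun e => bitv e j) (a.take k) := by
    rw [List.countP_pos_iff]
    refine ⟨a[i]'(by omega), ?_, hbi⟩
    have hi : i < (a.take k).length := by simp; omega
    have : (a.take k)[i]'hi = a[i]'(by omega) := List.getElem_take
    rw [← this]
    exact List.getElem_mem hi
  have h2 : 0 < List.countP (fun e => bitv e j) (a.drop k) := by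
    rw [List.countP_pos_iff]
    exact ⟨a[k]'hk, by rw [List.drop_eq_getElem_cons hk]; exact List.mem_cons_self, hbk⟩
  omega

/-- `_bit` is the indicator of `bitv`. -/
theorem bitB_eq (e : Int) (j : Int) :
    bitB e j = if bitv e j.toNat = true then 1 else 0 := by
  rw [bitB, bitv, Int.abs_eq_natAbs]
  have hsh : ((e.natAbs : Int) >>> j.toNat) = ((e.natAbs >>> j.toNat : Nat) : Int) := by
    exact_mod_cast rfl
  rw [hsh, show (1:Int) = ((1:Nat):Int) from rfl, PySem.Int.band_natCast,
    Nat.and_one_is_mod, Nat.shiftRight_eq_div_pow, Nat.testBit, Nat.shiftRight_eq_div_pow]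
  rcases Nat.mod_two_eq_zero_or_one (e.natAbs / 2 ^ j.toNat) with h | h <;>
    simp [h, Nat.and_one_is_mod]

/-- If the running best never improves, the argmax fold keeps its state. -/
theorem foldl_stay (f : Int → Int) : ∀ (l : List Int) (st : Int × Int),
    (∀ i ∈ l, ¬ f i > st.1) →
    l.foldl (fun (st : Int × Int) i => if f i > st.1 then (f i, i) else st) st = st := by
  intro l
  induction l with
  | nil => intro st _; rfl
  | cons x t ih =>
    intro st h
    rw [List.foldl_cons, if_neg (h x List.mem_cons_self)]
    exact ih st (fun i hi => h i (List.mem_cons_of_mem x hi))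

/-- A strictly dominant element wins A's first-strict-improvement argmax fold. -/
theorem foldl_winner (f : Int → Int) : ∀ (l : List Int) (st : Int × Int) (w : Int),
    w ∈ l → (∀ i ∈ l, i ≠ w → f i < f w) → st.1 < f w →
    l.foldl (fun (st : Int × Int) i => if f i > st.1 then (f i, i) else st) st = (f w, w) := by
  intro l
  induction l with
  | nil => intro st w hw; exact absurd hw (List.not_mem_nil)
  | cons x t ih =>
    intro st w hw hlt hst
    rw [List.foldl_cons]
    by_cases hx : x = w
    · subst hx
      rw [if_pos hst]
      apply foldl_stay
      intro i hi
      by_cases hiw : i = x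
      · subst hiw; simp
      · have := hlt i (List.mem_cons_of_mem x hi) hiw
        simp; omega
    · have hwt : w ∈ t := by
        rcases List.mem_cons.mp hw with h | h
        · exact absurd h.symm hx
        · exact h
      have hxlt : f x < f w := hlt x List.mem_cons_self hx
      by_cases hupd : f x > st.1
      · rw [if_pos hupd]
        exact ih (f x, x) w hwt (fun i hi hiw => hlt i (List.mem_cons_of_mem x hi) hiw) hxlt
      · rw [if_neg hupd]
        exact ih st w hwt (fun i hi hiw => hlt i (List.mem_cons_of_mem x hi) hiw) hst

/-- Skipping a bit position the scan passes through. -/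
theorem scanB_pass (n : Int) (a : List Int) (count : List Int) (j : Int) (js : List Int)
    (h : ¬ PySem.List.pyGetD count j 0 = 1 ∨
        (PySem.List.pyRange 0 n 1).find? (fun i => bitB (PySem.List.pyGetD a i 0) j != 0) = none) :
    scanB n a count (j :: js) = scanB n a count js := by
  rw [scanB]
  by_cases hc : PySem.List.pyGetD count j 0 = 1
  · rcases h with h | h
    · exact absurd hc h
    · rw [if_pos hc, h]
  · rw [if_neg hc]

theorem scanB_skip (n : Int) (a : List Int) (count : List Int) :
    ∀ (js₁ js₂ : List Int),
    (∀ j ∈ js₁, ¬ PySem.List.pyGetD count j 0 = 1 ∨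
        (PySem.List.pyRange 0 n 1).find? (fun i => bitB (PySem.List.pyGetD a i 0) j != 0) = none) →
    scanB n a count (js₁ ++ js₂) = scanB n a count js₂ := by
  intro js₁
  induction js₁ with
  | nil => intro js₂ _; rfl
  | cons j t ih =>
    intro js₂ h
    rw [List.cons_append, scanB_pass n a count j _ (h j List.mem_cons_self)]
    exact ih js₂ (fun j' hj' => h j' (List.mem_cons_of_mem j hj'))

theorem scanB_hit (n : Int) (a : List Int) (count : List Int) (j : Int) (js : List Int) (i : Int)
    (hc : PySem.List.pyGetD count j 0 = 1)
    (hf : (PySem.List.pyRange 0 n 1).find? (fun i => bitB (PySem.List.pyGetD a i 0) j != 0) = some i) :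
    scanB n a count (j :: js) = i := by
  rw [scanB, if_pos hc, hf]

theorem scanB_none (n : Int) (a : List Int) (count : List Int) :
    ∀ js : List Int,
    (∀ j ∈ js, ¬ PySem.List.pyGetD count j 0 = 1 ∨
        (PySem.List.pyRange 0 n 1).find? (fun i => bitB (PySem.List.pyGetD a i 0) j != 0) = none) →
    scanB n a count js = 0 := by
  intro js h
  have := scanB_skip n a count js [] h
  simpa using this

-- ===== VERDICT (by name: the statement is the Claim_ definition above) =====
theorem solve_spec : Claim_equal_solve := by
  intro n a hdom hpre
  obtain ⟨hne, hlen⟩ := hpre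
  have hbound : ∀ e ∈ a, e.natAbs ≤ 2 ^ 31 := by
    intro e hee
    have hd := hdom
    unfold Dom_solve at hd
    simp only [Bool.and_eq_true, List.all_eq_true] at hd
    have h2 := hd.2 e hee
    unfold pvDomInt at h2
    simp only [decide_eq_true_eq] at h2
    omega
  unfold Spec_solve
  simp only [solve, solve_alt]
  set tp := List.foldl (fun (st : List Int × List (List Int)) e =>
      ((List.foldl (fun (st2 : List Int × List Int) iv =>
          if iv.2 = '1' then
            (st2.1.set iv.1.toNat 1, st2.2.set iv.1.toNat (st2.2.getD iv.1.toNat 0 + 1))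
          else st2)
          (List.replicate 32 0, st.1)
          (PySem.List.enumerate (List.drop 1 (PySem.Int.pyBin e).toList).reverse 0)).2,
        st.2 ++ [(List.foldl (fun (st2 : List Int × List Int) iv =>
          if iv.2 = '1' then
            (st2.1.set iv.1.toNat 1, st2.2.set iv.1.toNat (st2.2.getD iv.1.toNat 0 + 1))
          else st2)
          (List.replicate 32 0, st.1)
          (PySem.List.enumerate (List.drop 1 (PySem.Int.pyBin e).toList).reverse 0)).1]))
    (List.replicate 32 0, ([] : List (List Int))) a with htp
  obtain ⟨T1, T2, T3⟩ := outer_fold a (List.replicate 32 0) [] (by simp) hbound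
  rw [← htp] at T1 T2 T3
  rw [List.nil_append] at T2
  have htot : ∀ j : Nat, j < 32 → tp.1.getD j 0 = (cnt a j : Int) := by
    intro j hj
    rw [T3 j]
    have : (List.replicate 32 (0 : Int)).getD j 0 = 0 := by
      rw [List.getD_eq_getElem?_getD, List.getElem?_replicate]
      split_ifs <;> simp
    rw [this, zero_add]
  rw [T2]
  -- B's per-bit count table
  set cl := List.map (fun j => (List.map (fun e => bitB e j) a).sum)
      (PySem.List.pyRange 0 32 1) with hcl
  have hcount : ∀ j : Int, 0 ≤ j → j < 32 → PySem.List.pyGetD cl j 0 = (cnt a j.toNat : Int) := by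
    intro j h0 h32
    rw [hcl, PySem.List.pyGetD_map_pyRange_of_nonneg
      (fun j => (List.map (fun e => bitB e j) a).sum) 32 j 0 h0 h32]
    have hfn : (fun e => bitB e j) = fun e => if bitv e j.toNat = true then (1:Int) else 0 :=
      funext (fun e => bitB_eq e j)
    rw [hfn, PySem.List.sum_map_ite_one_zero (fun e => bitv e j.toNat) a]
    rfl
  set L := PySem.List.pyRange 0 n 1 with hL
  have hmemL : ∀ i ∈ L, 0 ≤ i ∧ i < (a.length : Int) := by
    intro i hi
    obtain ⟨h0, hn⟩ := PySem.List.mem_pyRange_one.mp hi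
    exact ⟨h0, lt_of_lt_of_le hn hlen⟩
  set f := fun i => score a (PySem.List.pyGetD a i 0) with hf
  have hkey : ∀ i ∈ L,
      List.foldl (fun lv jv =>
        if tp.1.getD jv.1.toNat 0 = 1 ∧
            (PySem.List.pyGetD (List.map lcOf a) i []).getD jv.1.toNat 0 = 1 then
          lv + 2 ^ jv.1.toNat
        else lv) 0 (PySem.List.enumerate (PySem.List.pyGetD (List.map lcOf a) i []) 0) = f i := by
    intro i hi
    obtain ⟨hi0, hilen⟩ := hmemL i hi
    have hnat : i.toNat < a.length := by omega
    have hip : PySem.List.pyGetD (List.map lcOf a) i [] = lcOf (a[i.toNat]'hnat) := by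
      rw [PySem.List.pyGetD_eq_getElem _ _ hi0 (by simpa using hilen), List.getElem_map]
    have hgi : PySem.List.pyGetD a i 0 = a[i.toNat]'hnat :=
      PySem.List.pyGetD_eq_getElem a 0 hi0 hilen
    rw [hip, hf]
    dsimp only
    rw [hgi]
    exact lv_eq_sum a tp.1 _ htot
  set mm := List.foldl
      (fun (st : Int × Int) i =>
        if List.foldl (fun lv jv =>
              if tp.1.getD jv.1.toNat 0 = 1 ∧
                  (PySem.List.pyGetD (List.map lcOf a) i []).getD jv.1.toNat 0 = 1 then
                lv + 2 ^ jv.1.toNat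
              else lv) 0 (PySem.List.enumerate (PySem.List.pyGetD (List.map lcOf a) i []) 0) > st.1 then
          (List.foldl (fun lv jv =>
              if tp.1.getD jv.1.toNat 0 = 1 ∧
                  (PySem.List.pyGetD (List.map lcOf a) i []).getD jv.1.toNat 0 = 1 then
                lv + 2 ^ jv.1.toNat
              else lv) 0 (PySem.List.enumerate (PySem.List.pyGetD (List.map lcOf a) i []) 0), i)
        else st)
      ((0 : Int), (0 : Int)) L with hmmdef
  have hmm2 : mm = List.foldl (fun (st : Int × Int) i => if f i > st.1 then (f i, i) else st)
      ((0 : Int), (0 : Int)) L := by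
    rw [hmmdef]
    apply PySem.List.foldl_congr_mem
    intro acc i hi
    dsimp only
    rw [hkey i hi]
  have hpred : ∀ (j : Int) (i : Int),
      ((bitB (PySem.List.pyGetD a i 0) j != 0) = true) ↔
        bitv (PySem.List.pyGetD a i 0) j.toNat = true := by
    intro j i
    rw [bitB_eq]
    by_cases hb : bitv (PySem.List.pyGetD a i 0) j.toNat = true <;> simp [hb]
  have h32 : PySem.List.pyRange 0 32 1 = (List.range 32).map (fun k : Nat => (k : Int)) := by
    have := PySem.List.pyRange_zero_natCast 32
    norm_num at this ⊢
    exact this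
  by_cases hex : ∃ j : Nat, j < 32 ∧ cnt a j = 1 ∧
      ∃ i ∈ L, bitv (PySem.List.pyGetD a i 0) j = true
  · -- a highest unique bit with a holder among the first n exists
    obtain ⟨j0, hj032, hj0⟩ := hex
    have hPs : cnt a (Nat.findGreatest (fun j => cnt a j = 1 ∧
          ∃ i ∈ L, bitv (PySem.List.pyGetD a i 0) j = true) 31) = 1 ∧
        ∃ i ∈ L, bitv (PySem.List.pyGetD a i 0)
          (Nat.findGreatest (fun j => cnt a j = 1 ∧
            ∃ i ∈ L, bitv (PySem.List.pyGetD a i 0) j = true) 31) = true :=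
      Nat.findGreatest_spec (P := fun j => cnt a j = 1 ∧ ∃ i ∈ L, bitv (PySem.List.pyGetD a i 0) j = true) (show j0 ≤ 31 by omega) hj0
    set js := Nat.findGreatest (fun j => cnt a j = 1 ∧
        ∃ i ∈ L, bitv (PySem.List.pyGetD a i 0) j = true) 31 with hjsdef
    have hjs31 : js ≤ 31 := Nat.findGreatest_le 31
    have hgr : ∀ k : Nat, js < k → k ≤ 31 →
        ¬ (cnt a k = 1 ∧ ∃ i ∈ L, bitv (PySem.List.pyGetD a i 0) k = true) :=
      fun k h1 h2 => Nat.findGreatest_is_greatest h1 h2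
    have hsome : (L.find? (fun i => bitB (PySem.List.pyGetD a i 0) (js : Int) != 0)).isSome := by
      rw [List.find?_isSome]
      obtain ⟨i, hiL, hbi⟩ := hPs.2
      refine ⟨i, hiL, ?_⟩
      rw [hpred (js : Int) i, Int.toNat_natCast]
      exact hbi
    obtain ⟨w, hw⟩ := Option.isSome_iff_exists.mp hsome
    have hwL : w ∈ L := List.mem_of_find?_eq_some hw
    have hbw : bitv (PySem.List.pyGetD a w 0) js = true := by
      have := List.find?_some hw
      rw [hpred (js : Int) w, Int.toNat_natCast] at this
      exact this
    -- B's scan returns w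
    have hlead : scanB n a cl ((PySem.List.pyRange 0 32 1).reverse) = w := by
      rw [h32, show List.range 32 = List.range (js + 1) ++
          (List.range (31 - js)).map (fun t => (js + 1) + t) from by
        rw [show (32 : Nat) = (js + 1) + (31 - js) by omega, List.range_add],
        List.map_append, List.reverse_append, List.range_succ, List.map_append,
        List.reverse_append]
      simp only [List.map_cons, List.map_nil, List.reverse_cons, List.reverse_nil,
        List.nil_append, List.cons_append]
      rw [scanB_skip n a cl _ _ ?pass]
      case pass =>
        intro j hj
        rw [List.mem_reverse, List.mem_map] at hj
        obtain ⟨t', ht', rfl⟩ := hj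
        rw [List.mem_map] at ht'
        obtain ⟨t, ht, rfl⟩ := ht'
        have htlt := List.mem_range.mp ht
        set k := js + 1 + t with hk
        have hk31 : k ≤ 31 := by omega
        have hkgt : js < k := by omega
        by_cases hc : cnt a k = 1
        · right
          rw [List.find?_eq_none]
          intro i hiL
          rw [hpred (k : Int) i, Int.toNat_natCast]
          intro hbi
          exact hgr k hkgt hk31 ⟨hc, i, hiL, hbi⟩
        · left
          rw [hcount (k : Int) (Int.natCast_nonneg _) (by exact_mod_cast by omega), Int.toNat_natCast]
          exact_mod_cast hc
      exact scanB_hit n a cl (js : Int) _ w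
        (by rw [hcount (js : Int) (Int.natCast_nonneg _) (by exact_mod_cast by omega), Int.toNat_natCast,
              hPs.1]; rfl)
        hw
    -- A's argmax returns w
    have hfw_ge : (2 : Int) ^ js ≤ f w := by
      rw [hf]
      exact score_ge a _ js (by omega) hPs.1 hbw
    have hdomlt : ∀ i ∈ L, i ≠ w → f i < f w := by
      intro i hiL hiw
      have hterm0 : ∀ k : Nat, js ≤ k → k < 32 → term a (PySem.List.pyGetD a i 0) k = 0 := by
        intro k hk1 hk2
        rw [term]
        split_ifs with hcond
        · exfalso
          obtain ⟨hc1, hb1⟩ := hcond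
          rcases eq_or_lt_of_le hk1 with heq | hlt
          · subst heq
            obtain ⟨hi0, hilen⟩ := hmemL i hiL
            obtain ⟨hw0, hwlen⟩ := hmemL w hwL
            have hni : i.toNat < a.length := by omega
            have hnw : w.toNat < a.length := by omega
            have hgi : PySem.List.pyGetD a i 0 = a[i.toNat]'hni :=
              PySem.List.pyGetD_eq_getElem a 0 hi0 hilen
            have hgw : PySem.List.pyGetD a w 0 = a[w.toNat]'hnw :=
              PySem.List.pyGetD_eq_getElem a 0 hw0 hwlen
            have hnn : i.toNat ≠ w.toNat := by omega
            rw [hgi] at hb1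
            rw [hgw] at hbw
            rcases Nat.lt_or_ge i.toNat w.toNat with ho | ho
            · have := cnt_ge_two a js i.toNat w.toNat ho hnw hb1 hbw
              omega
            · have ho' : w.toNat < i.toNat := by omega
              have := cnt_ge_two a js w.toNat i.toNat ho' hni hbw hb1
              omega
          · exact hgr k hlt (by omega) ⟨hc1, i, hiL, hb1⟩
        · rfl
      calc f i < 2 ^ js := by rw [hf]; exact score_lt a _ js (by omega) hterm0
        _ ≤ f w := hfw_ge
    have hmmval : mm = (f w, w) := by
      rw [hmm2]
      exact foldl_winner f L ((0 : Int), (0 : Int)) w hwL hdomlt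
        (by have : (0 : Int) < 2 ^ js := by positivity
            simp only
            linarith)
    rw [hmmval, hlead]
    dsimp only
    have hfun : (fun (r : List Int) (i : Int) => if i = w then r else r ++ [PySem.List.pyGetD a i 0])
        = (fun r i => if (i != w) = true then r ++ [PySem.List.pyGetD a i 0] else r) := by
      funext r i
      by_cases h : i = w <;> simp [h]
    rw [hfun, PySem.List.foldl_append_if, List.singleton_append]
  · -- no unique bit has a holder among the first n: both sides keep index 0
    push_neg at hex
    have hlead : scanB n a cl ((PySem.List.pyRange 0 32 1).reverse) = 0 := by
      apply scanB_none
      intro j hj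
      rw [h32, List.mem_reverse, List.mem_map] at hj
      obtain ⟨k, hk, rfl⟩ := hj
      have hk32 := List.mem_range.mp hk
      by_cases hc : cnt a k = 1
      · right
        rw [List.find?_eq_none]
        intro i hiL
        rw [hpred (k : Int) i, Int.toNat_natCast]
        intro hbi
        exact hex k hk32 hc i hiL hbi
      · left
        rw [hcount (k : Int) (Int.natCast_nonneg _) (by exact_mod_cast hk32), Int.toNat_natCast]
        exact_mod_cast hc
    have hf0 : ∀ i ∈ L, f i = 0 := by
      intro i hiL
      rw [hf]
      apply score_zero
      intro k hk32
      rw [term]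
      split_ifs with hcond
      · exact absurd hcond.2 (hex k hk32 hcond.1 i hiL)
      · rfl
    have hmmval : mm = ((0 : Int), (0 : Int)) := by
      rw [hmm2]
      apply foldl_stay
      intro i hi
      rw [hf0 i hi]
      simp
    rw [hmmval, hlead]
    dsimp only
    have hfun : (fun (r : List Int) (i : Int) => if i = 0 then r else r ++ [PySem.List.pyGetD a i 0])
        = (fun r i => if (i != 0) = true then r ++ [PySem.List.pyGetD a i 0] else r) := by
      funext r i
      by_cases h : i = (0 : Int) <;> simp [h]
    rw [hfun, PySem.List.foldl_append_if, List.singleton_append]
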